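-- pv_equiv track=rewrite | github.com/Chiuliana/CS_Laboratory_works | Labs/Lab_1_Caesar's_cipher/task_1.2..py | generate_permuted_alphabet
-- ===== SOURCE A (Python) =====
-- def generate_permuted_alphabet(keyword):
--     keyword = keyword.upper()
--     alphabet = "ABCDEFGHIJKLMNOPQRSTUVWXYZ"
--
--     # Create a set of unique characters from the keyword
--     unique_chars = []
--     for char in keyword:
--         if char not in unique_chars and char in alphabet:
--             unique_chars.append(char)
--
--     # Create the permuted alphabet
--     for char in alphabet:
--         if char not in unique_chars:
--             unique_chars.append(char)
--
--     return ''.join(unique_chars)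
-- ===== SOURCE B (Python) =====
-- def generate_permuted_alphabet(keyword):
--     # One pass over the uppercased keyword maintaining the REMAINING alphabet:
--     # a letter still in the remaining alphabet is moved to the prefix and removed
--     # from it (duplicates / non-letters are skipped for free); what is left of
--     # the alphabet is the tail of the result, so no second pass is needed.
--     prefix = ""
--     remaining = "ABCDEFGHIJKLMNOPQRSTUVWXYZ"
--     for c in keyword.upper():
--         if c in remaining:
--             prefix += c
--             remaining = remaining.replace(c, "")
--     return prefix + remaining
-- ===== Notes on version B (the rewrite author's own statement) =====
-- stated objective: faster
-- what changed: Instead of A's two staged loops (accumulate unique keyword letters with membership scans over the accumulator, then a second pass appending the alphabet letters not yet taken), B makes a single pass over the keyword maintaining the complement - the remaining alphabet string - moving each letter found there to the prefix and removing it; the untouched remainder is the tail, so the second pass and the accumulator scans disappear. …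
import Mathlib
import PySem

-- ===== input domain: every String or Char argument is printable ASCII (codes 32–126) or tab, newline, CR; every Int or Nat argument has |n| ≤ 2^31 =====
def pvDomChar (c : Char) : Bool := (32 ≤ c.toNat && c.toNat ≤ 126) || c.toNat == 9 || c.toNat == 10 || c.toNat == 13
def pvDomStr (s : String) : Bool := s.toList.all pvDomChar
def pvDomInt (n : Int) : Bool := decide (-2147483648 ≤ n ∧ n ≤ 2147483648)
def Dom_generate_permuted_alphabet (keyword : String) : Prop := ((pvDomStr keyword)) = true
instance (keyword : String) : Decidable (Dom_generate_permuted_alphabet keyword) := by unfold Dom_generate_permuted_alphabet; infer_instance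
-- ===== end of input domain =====

-- B replaces A's two staged loops (accumulate unique keyword letters, then append the
-- leftover alphabet) by ONE pass over the keyword that maintains the REMAINING
-- alphabet, moving each letter found there to the prefix; the untouched remainder
-- is the tail, so the second pass disappears.

-- ===== PORT A =====
def generate_permuted_alphabet (keyword : String) : String :=
  let kw := PySem.Str.upper keyword
  let alphabet := "ABCDEFGHIJKLMNOPQRSTUVWXYZ"
  -- first loop: unique keyword characters that are in the alphabet
  let unique1 := kw.toList.foldl
    (fun (acc : List Char) (c : Char) =>
      if (!acc.contains c) && alphabet.toList.contains c then acc ++ [c] else acc) []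
  -- second loop: append the alphabet characters not yet present
  let unique2 := alphabet.toList.foldl
    (fun (acc : List Char) (c : Char) =>
      if !acc.contains c then acc ++ [c] else acc) unique1
  String.ofList unique2

-- ===== PORT B =====
-- loop body; remaining.replace(c, "") removes every occurrence of the single
-- character c, which is exactly the filter below (exact)
def pvStepB (pr : List Char × List Char) (c : Char) : List Char × List Char :=
  if pr.2.contains c then (pr.1 ++ [c], pr.2.filter (fun x => x != c)) else pr

def generate_permuted_alphabet_alt (keyword : String) : String :=
  let st := (PySem.Str.upper keyword).toList.foldl pvStepB
    ([], "ABCDEFGHIJKLMNOPQRSTUVWXYZ".toList)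
  String.ofList (st.1 ++ st.2)

-- ===== PRECONDITION & SPEC =====
def Spec_generate_permuted_alphabet (keyword : String) (out : String) : Prop := out = generate_permuted_alphabet_alt keyword
instance (keyword : String) (out : String) : Decidable (Spec_generate_permuted_alphabet keyword out) := by unfold Spec_generate_permuted_alphabet; infer_instance

-- ===== CLAIM (what is proved, stated in full; the proofs are below) =====
def Claim_equal_generate_permuted_alphabet : Prop := ∀ (keyword : String), Dom_generate_permuted_alphabet keyword → Spec_generate_permuted_alphabet keyword (generate_permuted_alphabet keyword)

-- ===== LEMMAS AND PROOFS =====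

def pvAlph : List Char := "ABCDEFGHIJKLMNOPQRSTUVWXYZ".toList

-- A's second loop over a duplicate-free list appends exactly the elements not already present
theorem pv_loop2_eq (l : List Char) (hnd : l.Nodup) : ∀ (init : List Char),
    l.foldl (fun (acc : List Char) (c : Char) =>
        if !acc.contains c then acc ++ [c] else acc) init
      = init ++ l.filter (fun c => !init.contains c) := by
  induction l with
  | nil => simp
  | cons c rest ih =>
    intro init
    simp only [List.foldl_cons]
    rcases List.nodup_cons.mp hnd with ⟨hc, hrest⟩
    cases h : init.contains c with
    | true =>
      have hci : c ∈ init := by simpa using h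
      rw [if_neg (by simp), ih hrest init, List.filter_cons]
      simp [hci]
    | false =>
      have hci : c ∉ init := by simpa using h
      rw [if_pos (by simp), ih hrest (init ++ [c]), List.filter_cons]
      have hfe : rest.filter (fun d => !(init ++ [c]).contains d)
          = rest.filter (fun d => !init.contains d) := by
        apply List.filter_congr
        intro d hd
        have hdc : d ≠ c := fun e => hc (e ▸ hd)
        simp [hdc]
      rw [hfe]
      simp [hci]

-- invariant: the one-pass loop over l with the remaining alphabet equals A's first loop
-- plus the leftover filter
theorem pv_go_eq (l : List Char) : ∀ (acc rem : List Char),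
    rem = pvAlph.filter (fun x => !acc.contains x) →
    (l.foldl pvStepB (acc, rem)).1 ++ (l.foldl pvStepB (acc, rem)).2
      = (l.foldl (fun (a : List Char) (c : Char) =>
            if (!a.contains c) && pvAlph.contains c then a ++ [c] else a) acc)
        ++ pvAlph.filter (fun x =>
            !(l.foldl (fun (a : List Char) (c : Char) =>
                if (!a.contains c) && pvAlph.contains c then a ++ [c] else a) acc).contains x) := by
  induction l with
  | nil => intro acc rem h; simpa using congrArg (acc ++ ·) h
  | cons c rest ih =>
    intro acc rem h
    have key : rem.contains c = ((!acc.contains c) && pvAlph.contains c) := by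
      subst h
      by_cases hm : c ∈ pvAlph <;> by_cases ha : c ∈ acc <;>
        simp_all [List.mem_filter]
    simp only [List.foldl_cons, pvStepB]
    cases hr : rem.contains c with
    | true =>
      rw [if_pos rfl, if_pos (key.symm.trans hr)]
      have hrem' : rem.filter (fun x => x != c)
          = pvAlph.filter (fun x => !(acc ++ [c]).contains x) := by
        subst h
        rw [List.filter_filter]
        apply List.filter_congr
        intro d _
        by_cases hdc : d = c <;> simp [hdc]
      have := ih (acc ++ [c]) (rem.filter (fun x => x != c)) hrem'
      simpa using this
    | false =>
      rw [if_neg (by simp), if_neg (by rw [key.symm.trans hr]; decide)]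
      exact ih acc rem h

-- ===== VERDICT (by name: the statement is the Claim_ definition above) =====
theorem generate_permuted_alphabet_spec : Claim_equal_generate_permuted_alphabet := by
  intro keyword _
  show generate_permuted_alphabet keyword = generate_permuted_alphabet_alt keyword
  simp only [generate_permuted_alphabet, generate_permuted_alphabet_alt]
  have hnd : pvAlph.Nodup := by decide
  have h0 : pvAlph = pvAlph.filter (fun x => !([] : List Char).contains x) := by simp
  have hgo := pv_go_eq (PySem.Str.upper keyword).toList [] pvAlph h0
  rw [show "ABCDEFGHIJKLMNOPQRSTUVWXYZ".toList = pvAlph from rfl,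
      pv_loop2_eq pvAlph hnd, ← hgo]
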